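-- pv_equiv track=rewrite | github.com/pypi-data/pypi-mirror-121 | packages/slai/slai-0.1.49-py3-none-any.whl/slai/modules/model_saver.py | _clean_model_source
-- ===== SOURCE A (Python) =====
-- def _clean_model_source(model_source):
--     model_source_lines = model_source.split("\n")
--     cleaned_model_source_lines = []
--
--     indentation_to_remove = 0
--     class_def_found = False
--     for line in model_source_lines:
--         if "class" in line and not class_def_found:
--             class_def_found = True
--
--             for c in line:
--                 if c != " ":
--                     break
--                 indentation_to_remove += 1
--
--         cleaned_model_source_lines.append(line[indentation_to_remove:])
--
--     return cleaned_model_source_lines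
-- ===== SOURCE B (Python) =====
-- def _clean_model_source(model_source):
--     def dedent(lines):
--         # structural recursion: emit lines untouched until the first line
--         # containing "class", then strip its leading-space count from the
--         # whole remaining suffix at once and stop recursing
--         if not lines:
--             return []
--         head, rest = lines[0], lines[1:]
--         if "class" in head:
--             n = len(head) - len(head.lstrip(" "))
--             return [l[n:] for l in lines]
--         return [head] + dedent(rest)
--     return dedent(model_source.split("\n"))
-- ===== Notes on version B (the rewrite author's own statement) =====
-- stated objective: alternative
-- what changed: Replaces A's single iterative pass with mutable indentation/flag state by a recursive decomposition: recurse line by line emitting lines unchanged, and on reaching the first line containing 'class' compute its leading-space count and strip it from the entire remaining suffix in one comprehension, ending the recursion.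
import Mathlib
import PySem

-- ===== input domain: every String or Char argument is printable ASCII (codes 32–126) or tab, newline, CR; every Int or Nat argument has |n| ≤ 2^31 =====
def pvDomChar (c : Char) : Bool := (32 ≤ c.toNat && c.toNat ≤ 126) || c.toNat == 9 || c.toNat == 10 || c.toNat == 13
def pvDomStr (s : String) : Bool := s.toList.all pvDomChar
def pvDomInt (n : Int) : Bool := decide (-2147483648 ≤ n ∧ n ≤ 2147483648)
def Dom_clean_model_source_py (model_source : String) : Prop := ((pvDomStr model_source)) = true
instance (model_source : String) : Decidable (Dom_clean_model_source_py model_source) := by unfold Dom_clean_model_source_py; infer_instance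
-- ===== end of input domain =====

-- B replaces A's stateful accumulator pass by a recursive decomposition (recurse until the class line, then strip the whole suffix at once); equivalence is total.

-- ===== PORT A =====
-- inner loop 'for c in line: if c != " ": break; indentation_to_remove += 1'
def pvLeadSpacesA (cs : List Char) (acc : Int) : Int :=
  match cs with
  | [] => acc
  | c :: rest => if c != ' ' then acc else pvLeadSpacesA rest (acc + 1)

-- the main for-loop over the lines, state = (indentation_to_remove, class_def_found)
def pvCleanLoopA (lines : List String) (indent : Int) (found : Bool) : List String :=
  match lines with
  | [] => []
  | line :: rest =>
    if PySem.Str.isIn "class" line && !found then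
      let indent' := pvLeadSpacesA line.toList indent
      PySem.Str.slice line (some indent') none :: pvCleanLoopA rest indent' true
    else
      PySem.Str.slice line (some indent) none :: pvCleanLoopA rest indent found

def clean_model_source_py (model_source : String) : List String :=
  pvCleanLoopA ((PySem.Str.split? model_source "\n").getD []) 0 false

-- ===== PORT B =====
-- head.lstrip(" ") is ported by hand as dropWhile (· == ' ') — exact for the single char " ".
def pvDedentB (lines : List String) : List String :=
  match lines with
  | [] => []
  | head :: rest =>
    if PySem.Str.isIn "class" head then
      let n : Int :=
        PySem.Str.len head - PySem.Str.len (String.ofList (head.toList.dropWhile (· == ' ')))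
      (head :: rest).map (fun l => PySem.Str.slice l (some n) none)
    else head :: pvDedentB rest

def clean_model_source_py_alt (model_source : String) : List String :=
  pvDedentB ((PySem.Str.split? model_source "\n").getD [])

-- ===== PRECONDITION & SPEC =====
def Spec_clean_model_source_py (model_source : String) (out : List String) : Prop := out = clean_model_source_py_alt model_source
instance (model_source : String) (out : List String) : Decidable (Spec_clean_model_source_py model_source out) := by unfold Spec_clean_model_source_py; infer_instance

-- ===== CLAIM (what is proved, stated in full; the proofs are below) =====
def Claim_equal_clean_model_source_py : Prop := ∀ (model_source : String), Dom_clean_model_source_py model_source → Spec_clean_model_source_py model_source (clean_model_source_py model_source)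

-- ===== LEMMAS AND PROOFS =====

theorem pvSliceZero (s : String) : PySem.Str.slice s (some 0) none = s := by
  simp [PySem.Str.slice]

theorem pvLeadSpacesA_eq (cs : List Char) (acc : Int) :
    pvLeadSpacesA cs acc = acc + (cs.takeWhile (· == ' ')).length := by
  induction cs generalizing acc with
  | nil => simp [pvLeadSpacesA]
  | cons c rest ih =>
    by_cases h : c = ' '
    · subst h
      simp [pvLeadSpacesA, ih]
      omega
    · simp [pvLeadSpacesA, h]

theorem pvIndentB_eq (cl : String) :
    PySem.Str.len cl - PySem.Str.len (String.ofList (cl.toList.dropWhile (· == ' ')))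
      = (cl.toList.takeWhile (· == ' ')).length := by
  have h := congrArg List.length (List.takeWhile_append_dropWhile (p := (· == ' ')) (l := cl.toList))
  rw [List.length_append] at h
  have h2 : cl.toList.length = cl.length := by simp
  simp [PySem.Str.len]
  omega

-- after the class line is found, A maps a fixed slice over the rest
theorem pvCleanLoopA_found (lines : List String) (indent : Int) :
    pvCleanLoopA lines indent true
      = lines.map (fun l => PySem.Str.slice l (some indent) none) := by
  induction lines with
  | nil => simp [pvCleanLoopA]
  | cons line rest ih => simp [pvCleanLoopA, ih]

theorem pvMain (lines : List String) : pvCleanLoopA lines 0 false = pvDedentB lines := by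
  induction lines with
  | nil => simp [pvCleanLoopA, pvDedentB]
  | cons line rest ih =>
    by_cases hc : PySem.Str.isIn "class" line = true
    · simp only [pvCleanLoopA, pvDedentB, hc, Bool.not_false, Bool.and_true, if_pos,
        List.map_cons]
      rw [pvCleanLoopA_found, pvLeadSpacesA_eq, pvIndentB_eq]
      simp
    · simp only [Bool.not_eq_true] at hc
      simp only [pvCleanLoopA, pvDedentB, hc, Bool.false_and, if_neg, Bool.false_eq_true,
        not_false_iff, pvSliceZero, ih]

-- ===== VERDICT (by name: the statement is the Claim_ definition above) =====
theorem clean_model_source_py_spec : Claim_equal_clean_model_source_py := by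
  intro s _
  unfold Spec_clean_model_source_py clean_model_source_py clean_model_source_py_alt
  exact pvMain _
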